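-- pv_equiv track=rewrite | github.com/ornwipa/etranger_pca_clstr | svd_clstr.py | combineData
-- ===== SOURCE A (Python) =====
-- def combineData(data):
--     ''' to reduce the effect of short paragraphs ...
--     combine corpus text by shrinking each of 3 rows in to one,
--     the 204 rows are reshaped to 68 rows '''
--     new_data = []
--     for i in range(len(data)):
--         if i % 3 == 0:
--             text = ''
--         text += data[i]
--         if i % 3 == 2:
--             new_data.append(text)
--     return new_data
-- ===== SOURCE B (Python) =====
-- def combineData(data):
--     ''' combine every 3 consecutive rows into one string, dropping a trailing
--     partial group; grouping expressed directly via slice boundaries '''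
--     return [''.join(data[i:i+3]) for i in range(0, (len(data) // 3) * 3, 3)]
-- ===== Notes on version B (the rewrite author's own statement) =====
-- stated objective: simpler
-- what changed: Replaces the element-by-element scan with a modulo-reset running accumulator by a single comprehension over group-start indices (stride 3), joining each 3-element slice directly.
import Mathlib
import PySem

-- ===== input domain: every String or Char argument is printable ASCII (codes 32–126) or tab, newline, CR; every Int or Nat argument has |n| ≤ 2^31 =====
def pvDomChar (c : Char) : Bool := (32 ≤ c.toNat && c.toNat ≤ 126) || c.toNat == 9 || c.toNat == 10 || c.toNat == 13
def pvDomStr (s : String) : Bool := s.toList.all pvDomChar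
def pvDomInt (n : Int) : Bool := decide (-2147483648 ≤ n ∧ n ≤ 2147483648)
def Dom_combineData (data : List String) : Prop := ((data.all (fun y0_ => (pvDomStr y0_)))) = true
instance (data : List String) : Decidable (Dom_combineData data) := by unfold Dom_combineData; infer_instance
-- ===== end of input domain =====

-- B replaces A's modulo-reset running accumulator with a comprehension over
-- stride-3 group-start indices, joining each 3-element slice (objective: simpler).

-- ===== PORT A =====
-- literal transliteration of A: scan indices 0..len-1, reset `text` at i%3==0,
-- append the accumulated `text` at i%3==2
def combineData (data : List String) : List String :=
  (PySem.List.pyRange 0 (PySem.List.len data) 1).foldl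
    (fun (st : List String × String) i =>
      let text := if PySem.Int.mod i 3 = 0 then "" else st.2
      let text := text ++ PySem.List.pyGetD data i ""
      if PySem.Int.mod i 3 = 2 then (st.1 ++ [text], text) else (st.1, text))
    ([], "")
  |>.1

-- ===== PORT B =====
-- literal transliteration of B: [''.join(data[i:i+3]) for i in range(0, (len(data)//3)*3, 3)]
def combineData_alt (data : List String) : List String :=
  (PySem.List.pyRange 0 (PySem.Int.floordiv (PySem.List.len data) 3 * 3) 3).map
    (fun i => PySem.Str.join "" (PySem.List.slice data (some i) (some (i + 3))))

-- ===== PRECONDITION & SPEC =====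
def Spec_combineData (data : List String) (out : List String) : Prop := out = combineData_alt data
instance (data : List String) (out : List String) : Decidable (Spec_combineData data out) := by unfold Spec_combineData; infer_instance

-- ===== CLAIM (what is proved, stated in full; the proofs are below) =====
def Claim_equal_combineData : Prop := ∀ (data : List String), Dom_combineData data → Spec_combineData data (combineData data)

-- ===== LEMMAS AND PROOFS =====

-- the common description of both results: join every 3 consecutive rows, drop a partial tail
def chunk3 : List String → List String
  | a :: b :: c :: rest => ((("" ++ a) ++ b) ++ c) :: chunk3 rest
  | _ => []

theorem join3 (a b c : String) :
    PySem.Str.join "" [a, b, c] = (("" ++ a) ++ b) ++ c := by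
  apply String.ext
  simp [PySem.Str.toList_join, PySem.Chars.join, List.intercalate, List.intersperse]

theorem chunk3_length (data : List String) :
    data.length / 3 = (chunk3 data).length := by
  match data with
  | [] => simp [chunk3]
  | [a] => simp [chunk3]
  | [a, b] => simp [chunk3]
  | a :: b :: c :: rest =>
    simp only [List.length_cons, chunk3]
    rw [← chunk3_length rest]
    omega

theorem alt_eq_range (data : List String) :
    combineData_alt data =
      (List.range (data.length / 3)).map
        (fun k => PySem.Str.join "" ((data.drop (3 * k)).take 3)) := by
  unfold combineData_alt
  rw [PySem.List.pyRange_of_pos 0 _ (by omega)]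
  rw [List.map_map]
  have hlen : PySem.Int.floordiv (PySem.List.len data) 3 * 3
      = ((data.length / 3 * 3 : Nat) : Int) := by
    rw [PySem.List.len_eq, PySem.Int.floordiv_eq_ediv_of_pos (by omega)]
    omega
  rw [hlen]
  have hcount : (if (0 : Int) < ((data.length / 3 * 3 : Nat) : Int)
      then ((((data.length / 3 * 3 : Nat) : Int) - 0 + 3 - 1) / 3).toNat else 0)
      = data.length / 3 := by
    split_ifs with h
    · omega
    · omega
  rw [hcount]
  apply List.map_congr_left
  intro k _
  simp only [Function.comp]
  have h0 : (0 : Int) + 3 * (k : Int) = ((3 * k : Nat) : Int) := by push_cast; ring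
  rw [h0]
  rw [show ((3 * k : Nat) : Int) + 3 = ((3 * k : Nat) : Int) + ((3 : Nat) : Int) by norm_num]
  rw [PySem.List.slice_natCast_add]

theorem range_eq_chunk3 (data : List String) :
    (List.range (data.length / 3)).map
      (fun k => PySem.Str.join "" ((data.drop (3 * k)).take 3)) = chunk3 data := by
  match data with
  | [] => simp [chunk3]
  | [a] => simp [chunk3]
  | [a, b] => simp [chunk3]
  | a :: b :: c :: rest =>
    have hl : (a :: b :: c :: rest).length / 3 = rest.length / 3 + 1 := by
      simp only [List.length_cons]; omega
    rw [hl, List.range_succ_eq_map, List.map_cons, List.map_map]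
    have hhead : PySem.Str.join "" (((a :: b :: c :: rest).drop (3 * 0)).take 3)
        = (("" ++ a) ++ b) ++ c := by
      simp [join3]
    rw [hhead]
    show _ = chunk3 (a :: b :: c :: rest)
    rw [chunk3]
    congr 1
    rw [← range_eq_chunk3 rest]
    apply List.map_congr_left
    intro k _
    simp only [Function.comp]
    have hd : (a :: b :: c :: rest).drop (3 * (k + 1)) = rest.drop (3 * k) := by
      rw [show 3 * (k + 1) = 3 * k + 3 by ring, ← List.drop_drop]
      simp
    rw [hd]

-- A's loop, re-expressed over (index, element) pairs starting at any index ≡ 0 (mod 3)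
theorem foldA_enum (data : List String) :
    ∀ (s : Int), s % 3 = 0 → ∀ (acc : List String) (t : String),
      ((PySem.List.enumerate data s).foldl
        (fun (st : List String × String) p =>
          let text := if PySem.Int.mod p.1 3 = 0 then "" else st.2
          let text := text ++ p.2
          if PySem.Int.mod p.1 3 = 2 then (st.1 ++ [text], text) else (st.1, text))
        (acc, t)).1 = acc ++ chunk3 data := by
  match data with
  | [] => intro s hs acc t; simp [PySem.List.enumerate, chunk3]
  | [a] =>
    intro s hs acc t
    simp only [PySem.List.enumerate, List.foldl_cons, List.foldl_nil]
    simp only [PySem.Int.mod_eq_emod_of_pos (by omega : (0:Int) < 3)]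
    rw [if_pos hs, if_neg (by omega)]
    simp [chunk3]
  | [a, b] =>
    intro s hs acc t
    simp only [PySem.List.enumerate, List.foldl_cons, List.foldl_nil]
    simp only [PySem.Int.mod_eq_emod_of_pos (by omega : (0:Int) < 3)]
    rw [if_pos hs, if_neg (by omega), if_neg (by omega), if_neg (by omega)]
    simp [chunk3]
  | a :: b :: c :: rest =>
    intro s hs acc t
    simp only [PySem.List.enumerate, List.foldl_cons]
    simp only [PySem.Int.mod_eq_emod_of_pos (by omega : (0:Int) < 3)]
    have hs1 : (s + 1) % 3 = 1 := by omega
    have hs2 : (s + 1 + 1) % 3 = 2 := by omega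
    simp only [hs, hs1, hs2]
    norm_num
    have hrec := foldA_enum rest (s + 1 + 1 + 1) (by omega)
      (acc ++ [(("" ++ a) ++ b) ++ c]) ((("" ++ a) ++ b) ++ c)
    simp only [PySem.Int.mod_eq_emod_of_pos (by omega : (0:Int) < 3)] at hrec
    norm_num at hrec
    rw [hrec, chunk3]
    simp

theorem a_eq_chunk3 (data : List String) : combineData data = chunk3 data := by
  unfold combineData
  have he := PySem.List.enumerate_eq_map_pyRange data ""
  have : (PySem.List.pyRange 0 (PySem.List.len data) 1).foldl
      (fun (st : List String × String) i =>
        let text := if PySem.Int.mod i 3 = 0 then "" else st.2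
        let text := text ++ PySem.List.pyGetD data i ""
        if PySem.Int.mod i 3 = 2 then (st.1 ++ [text], text) else (st.1, text))
      ([], "")
      = (PySem.List.enumerate data 0).foldl
        (fun (st : List String × String) p =>
          let text := if PySem.Int.mod p.1 3 = 0 then "" else st.2
          let text := text ++ p.2
          if PySem.Int.mod p.1 3 = 2 then (st.1 ++ [text], text) else (st.1, text))
        ([], "") := by
    rw [he, List.foldl_map]
  rw [this]
  have := foldA_enum data 0 (by decide) [] ""
  simpa using this

-- ===== VERDICT (by name: the statement is the Claim_ definition above) =====
theorem combineData_spec : Claim_equal_combineData := by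
  intro data _
  unfold Spec_combineData
  rw [a_eq_chunk3, alt_eq_range, range_eq_chunk3]
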